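-- pv_equiv track=rewrite | github.com/tom-weatherbee/contractive-mapping | main.py | offsetsList
-- ===== SOURCE A (Python) =====
-- from typing import List, Set, Dict
--
-- def offsetsList(mapping) -> List[int]:
--     out = []
--     for numLabels in range(2, len(mapping)):
--         offsets = [1] + [1 for x in range(numLabels - 1)]
--
--         def iterateOffsets() -> bool:
--             offsets[-1] += 1
--             numOverflows = 0
--             while sum(offsets) >= len(mapping):
--                 numOverflows += 1
--                 if numOverflows == numLabels:
--                     return False
--                 offsets[-numOverflows:] = [1 for x in offsets[-numOverflows:]]
--                 offsets[-(numOverflows + 1)] += 1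
--             return True
--
--         out += [offsets.copy()]
--         while iterateOffsets():
--             out += [offsets.copy()]
--     return out
-- ===== SOURCE B (Python) =====
-- def comps(k, budget):
--     # all length-k tuples of positive ints with sum <= budget, lexicographic order
--     if k == 0:
--         return [[]]
--     return [[v] + rest for v in range(1, budget - k + 2) for rest in comps(k - 1, budget - v)]
--
-- def offsetsList(mapping):
--     n = len(mapping)
--     out = []
--     for k in range(2, n):
--         out.extend(comps(k, n - 1))
--     return out
-- ===== Notes on version B (the rewrite author's own statement) =====
-- stated objective: simpler
-- what changed: Replaced A's in-place odometer loop (increment last entry, then a carry/overflow while-loop that resets suffixes and bumps earlier positions) by a recursive generator of bounded-sum compositions: for each length k it emits [v]+rest for v = 1..budget-k+1 with rest generated recursively from the remaining budget, yielding the same lexicographic enumeration with no mutable state.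
import Mathlib
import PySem

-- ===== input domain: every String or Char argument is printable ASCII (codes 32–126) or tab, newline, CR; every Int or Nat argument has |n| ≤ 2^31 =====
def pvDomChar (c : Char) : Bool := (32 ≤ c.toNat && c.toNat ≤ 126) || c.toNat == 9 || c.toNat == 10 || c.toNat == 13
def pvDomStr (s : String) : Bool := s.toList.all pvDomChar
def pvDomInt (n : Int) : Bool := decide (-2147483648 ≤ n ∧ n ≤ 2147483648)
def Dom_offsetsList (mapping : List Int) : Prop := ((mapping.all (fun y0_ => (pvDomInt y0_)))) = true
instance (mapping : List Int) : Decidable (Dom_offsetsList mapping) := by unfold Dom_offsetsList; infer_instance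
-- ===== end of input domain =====

-- B replaces A's in-place odometer with carry/overflow handling by a recursive
-- composition generator (objective: simpler); same return value, A's mutation is internal only.

-- ===== PORT A =====

-- Python slice assignment `offsets[-no:] = [1]*no; offsets[-(no+1)] += 1`;
-- exact for no + 1 ≤ offsets.length, which holds throughout A's execution.
def pvSetCarry (offsets : List Int) (no : Nat) : List Int :=
  let j := offsets.length - (no + 1)
  offsets.take j ++ (offsets.getD j 0 + 1) :: List.replicate no 1

-- the `while sum(offsets) >= len(mapping)` carry loop; fuel = numLabels is
-- always sufficient since numOverflows strictly increases and stops before numLabels.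
def pvCarry (n : Int) (numLabels : Nat) : Nat → List Int → Nat → Option (List Int)
  | 0, offsets, _ => some offsets          -- unreachable with fuel = numLabels
  | fuel+1, offsets, numOverflows =>
    if n ≤ offsets.sum then
      if numOverflows + 1 = numLabels then none
      else pvCarry n numLabels fuel (pvSetCarry offsets (numOverflows + 1)) (numOverflows + 1)
    else some offsets

-- iterateOffsets: `offsets[-1] += 1` then the carry loop (offsets nonempty in A)
def pvStep (n : Int) (numLabels : Nat) (offsets : List Int) : Option (List Int) :=
  pvCarry n numLabels numLabels (offsets.dropLast ++ [offsets.getLastD 0 + 1]) 0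

-- `while iterateOffsets(): out += [offsets.copy()]`; fuel-bounded, the chosen
-- fuel (mapping.length+1)^(numLabels+1) is proved sufficient below.
def pvLoop (n : Int) (numLabels : Nat) : Nat → List Int → List (List Int)
  | 0, _ => []
  | fuel+1, offsets =>
    match pvStep n numLabels offsets with
    | some o' => o' :: pvLoop n numLabels fuel o'
    | none => []

def offsetsList (mapping : List Int) : List (List Int) :=
  (PySem.List.pyRange 2 (mapping.length) 1).foldl (fun out nl =>
    out ++ (1 :: List.replicate (nl.toNat - 1) 1) ::
      pvLoop (mapping.length : Int) nl.toNat ((mapping.length + 1) ^ (nl.toNat + 1))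
        (1 :: List.replicate (nl.toNat - 1) 1)) []

-- ===== PORT B =====

-- all length-k lists of positive ints with sum ≤ budget, lexicographic order
def pvComps : Nat → Int → List (List Int)
  | 0, _ => [[]]
  | k+1, budget =>
      (PySem.List.pyRange 1 (budget - (k + 1) + 2) 1).flatMap
        (fun v => (pvComps k (budget - v)).map (fun rest => v :: rest))

def offsetsList_alt (mapping : List Int) : List (List Int) :=
  (PySem.List.pyRange 2 (mapping.length) 1).foldl
    (fun out nl => out ++ pvComps nl.toNat ((mapping.length : Int) - 1)) []

-- ===== PRECONDITION & SPEC =====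
def Spec_offsetsList (mapping : List Int) (out : List (List Int)) : Prop := out = offsetsList_alt mapping
instance (mapping : List Int) (out : List (List Int)) : Decidable (Spec_offsetsList mapping out) := by unfold Spec_offsetsList; infer_instance

-- ===== CLAIM (what is proved, stated in full; the proofs are below) =====
def Claim_equal_offsetsList : Prop := ∀ (mapping : List Int), Dom_offsetsList mapping → Spec_offsetsList mapping (offsetsList mapping)

-- ===== LEMMAS AND PROOFS =====

-- proof-only helpers: the suffix specification of A's enumeration
def pvRows (m : Int) (k : Nat) (v : Int) : List (List Int) :=
  (PySem.List.pyRange v (m - k) 1).flatMap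
    (fun v' => (pvComps k (m - v' - 1)).map (fun rest => v' :: rest))

def pvTail (m : Int) : List Int → List (List Int)
  | [] => [[]]
  | v :: t => ((pvTail (m - v) t).map (fun rest => v :: rest)) ++ pvRows m t.length (v + 1)

def pvValid (m : Int) (s : List Int) : Prop := (∀ x ∈ s, 1 ≤ x) ∧ s.sum < m

theorem pvComps_eq_rows (k : Nat) (b : Int) : pvComps (k+1) b = pvRows (b+1) k 1 := by
  simp only [pvComps, pvRows]
  rw [show b + 1 - (k:Int) = b - ((k:Int)+1) + 2 by ring]
  congr 1
  funext v
  rw [show b + 1 - v - 1 = b - v by ring]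

theorem pvRows_cons (m : Int) (k : Nat) (v : Int) (h : v < m - k) :
    pvRows m k v = (pvComps k (m - v - 1)).map (fun rest => v :: rest) ++ pvRows m k (v + 1) := by
  simp only [pvRows]
  rw [PySem.List.pyRange_one_cons h]
  rfl

theorem pvRows_nil (m : Int) (k : Nat) (v : Int) (h : m - k ≤ v) : pvRows m k v = [] := by
  simp only [pvRows]
  rw [PySem.List.pyRange_one_eq_nil h]
  rfl

theorem pvOnes_tail (k : Nat) (m : Int) (h : (k : Int) < m) :
    pvTail m (List.replicate k 1) = pvComps k (m - 1) := by
  induction k generalizing m with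
  | zero => simp [pvTail, pvComps]
  | succ k ih =>
    rw [List.replicate_succ]
    simp only [pvTail, List.length_replicate]
    rw [ih (m - 1) (by omega)]
    rw [pvComps_eq_rows, show m - 1 + 1 = m by ring]
    rw [pvRows_cons m k 1 (by omega)]

theorem pvSetCarry_cons (v : Int) (t : List Int) (no : Nat) (h : no + 1 ≤ t.length) :
    pvSetCarry (v :: t) no = v :: pvSetCarry t no := by
  obtain ⟨j, hj⟩ : ∃ j, t.length - no = j + 1 := ⟨t.length - no - 1, by omega⟩
  simp only [pvSetCarry, List.length_cons]
  rw [show t.length + 1 - (no + 1) = j + 1 by omega, show t.length - (no + 1) = j by omega]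
  simp [List.getD]

theorem pvSetCarry_top (v : Int) (t : List Int) :
    pvSetCarry (v :: t) t.length = (v + 1) :: List.replicate t.length 1 := by
  simp [pvSetCarry]

theorem pvSetCarry_length (t : List Int) (no : Nat) (h : no + 1 ≤ t.length) :
    (pvSetCarry t no).length = t.length := by
  simp only [pvSetCarry, List.length_append, List.length_take, List.length_cons,
    List.length_replicate]
  omega

theorem pvCarry_dec (m v : Int) : ∀ (f₂ : Nat) (t : List Int) (no f₁ : Nat),
    no < t.length → t.length - no ≤ f₂ → t.length - no < f₁ →
    pvCarry m (t.length + 1) f₁ (v :: t) no =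
      (match pvCarry (m - v) t.length f₂ t no with
       | some t' => some (v :: t')
       | none => if m ≤ v + 1 + t.length then none
                 else some ((v + 1) :: List.replicate t.length 1)) := by
  intro f₂
  induction f₂ with
  | zero => intro t no f₁ h1 h2 h3; omega
  | succ f₂ ih =>
    intro t no f₁ h1 h2 h3
    obtain ⟨f₁', rfl⟩ : ∃ f₁', f₁ = f₁' + 1 := ⟨f₁ - 1, by omega⟩
    by_cases hs : m - v ≤ t.sum
    · have hs' : m ≤ (v :: t).sum := by rw [List.sum_cons]; omega
      by_cases hno : no + 1 = t.length
      · -- carry exhausts the tail: reset it and bump the head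
        have hin : pvCarry (m - v) t.length (f₂ + 1) t no = none := by
          rw [pvCarry, if_pos hs, if_pos hno]
        rw [hin]
        show _ = if m ≤ v + 1 + (t.length : Int) then none
                 else some ((v + 1) :: List.replicate t.length 1)
        rw [pvCarry, if_pos hs', if_neg (by omega : ¬ no + 1 = t.length + 1)]
        rw [show pvSetCarry (v :: t) (no + 1) = (v + 1) :: List.replicate t.length 1 by
          rw [hno]; exact pvSetCarry_top v t]
        obtain ⟨f₁'', rfl⟩ : ∃ f₁'', f₁' = f₁'' + 1 := ⟨f₁' - 1, by omega⟩
        rw [pvCarry]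
        have hrep : (List.replicate t.length (1 : Int)).sum = (t.length : Int) := by simp
        rw [List.sum_cons, hrep]
        by_cases hm : m ≤ v + 1 + (t.length : Int)
        · rw [if_pos hm, if_pos (by omega : no + 1 + 1 = t.length + 1), if_pos hm]
        · rw [if_neg hm, if_neg hm]
      · -- carry continues inside the tail
        have hin : pvCarry (m - v) t.length (f₂ + 1) t no =
            pvCarry (m - v) t.length f₂ (pvSetCarry t (no + 1)) (no + 1) := by
          rw [pvCarry, if_pos hs, if_neg hno]
        rw [hin]
        rw [pvCarry, if_pos hs', if_neg (by omega : ¬ no + 1 = t.length + 1)]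
        rw [pvSetCarry_cons v t (no + 1) (by omega)]
        have hlen : (pvSetCarry t (no + 1)).length = t.length :=
          pvSetCarry_length t (no + 1) (by omega)
        have hrec := ih (pvSetCarry t (no + 1)) (no + 1) f₁' (by omega) (by omega) (by omega)
        rw [hlen] at hrec
        exact hrec
    · have hs' : ¬ m ≤ (v :: t).sum := by rw [List.sum_cons]; omega
      have hin : pvCarry (m - v) t.length (f₂ + 1) t no = some t := by
        rw [pvCarry, if_neg hs]
      rw [hin]
      show _ = some (v :: t)
      rw [pvCarry, if_neg hs']

theorem pvStep_cons (m v : Int) (t : List Int) (ht : t ≠ []) :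
    pvStep m (t.length + 1) (v :: t) =
      (match pvStep (m - v) t.length t with
       | some t' => some (v :: t')
       | none => if m ≤ v + 1 + t.length then none
                 else some ((v + 1) :: List.replicate t.length 1)) := by
  obtain ⟨x, hx⟩ : ∃ x, t.getLast? = some x := ⟨t.getLast ht, List.getLast?_eq_some_getLast ht⟩
  have hget : (v :: t).getLastD 0 = t.getLastD 0 := by
    rw [List.getLastD_cons, List.getLastD_eq_getLast?, List.getLastD_eq_getLast?, hx]
    rfl
  have hdrop : (v :: t).dropLast = v :: t.dropLast := List.dropLast_cons_of_ne_nil ht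
  have hu : (t.dropLast ++ [t.getLastD 0 + 1]).length = t.length := by
    rcases t with _ | ⟨y, t'⟩
    · exact absurd rfl ht
    · simp [List.length_dropLast]
  show pvCarry m (t.length + 1) (t.length + 1)
      ((v :: t).dropLast ++ [(v :: t).getLastD 0 + 1]) 0 = _
  rw [hget, hdrop, List.cons_append]
  have hdec := pvCarry_dec m v t.length (t.dropLast ++ [t.getLastD 0 + 1]) 0 (t.length + 1)
    (by rw [hu]; exact List.length_pos_of_ne_nil ht) (by rw [hu]; omega) (by rw [hu]; omega)
  rw [hu] at hdec
  exact hdec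

theorem pvStep_single (m v : Int) :
    pvStep m 1 [v] = if m ≤ v + 1 then none else some [v + 1] := by
  show pvCarry m 1 1 ([v].dropLast ++ [[v].getLastD 0 + 1]) 0 = _
  have : [v].dropLast ++ [[v].getLastD 0 + 1] = [v + 1] := by simp
  rw [this]
  simp only [pvCarry, List.sum_cons, List.sum_nil, add_zero]
  split_ifs with h <;> rfl

theorem pvSucc (s : List Int) : ∀ (m : Int), s ≠ [] → pvValid m s →
    (pvStep m s.length s = none → pvTail m s = [s]) ∧
    (∀ s', pvStep m s.length s = some s' →
      pvValid m s' ∧ s'.length = s.length ∧ pvTail m s = s :: pvTail m s') := by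
  induction s with
  | nil => intro m h; exact absurd rfl h
  | cons v t ih =>
    intro m _ hval
    obtain ⟨hpos, hsum⟩ := hval
    have hv : 1 ≤ v := hpos v List.mem_cons_self
    by_cases ht : t = []
    · subst ht
      rw [List.sum_cons, List.sum_nil, add_zero] at hsum
      rw [show ([v] : List Int).length = 1 from rfl, pvStep_single]
      by_cases hm : m ≤ v + 1
      · constructor
        · intro _
          show pvTail m [v] = [[v]]
          simp only [pvTail, List.length_nil]
          rw [pvRows_nil m 0 (v + 1) (by push_cast; omega)]
          simp
        · intro s' hs'
          rw [if_pos hm] at hs'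
          simp at hs'
      · constructor
        · intro hnone
          rw [if_neg hm] at hnone
          simp at hnone
        · intro s' hs'
          rw [if_neg hm] at hs'
          have hseq : [v + 1] = s' := Option.some.inj hs'
          subst hseq
          refine ⟨⟨?_, ?_⟩, rfl, ?_⟩
          · intro x hx
            rw [List.mem_singleton] at hx
            omega
          · rw [List.sum_cons, List.sum_nil, add_zero]; omega
          · simp only [pvTail, List.length_nil]
            rw [pvRows_cons m 0 (v + 1) (by push_cast; omega)]
            simp [pvComps]
    · have hvalt : pvValid (m - v) t :=
        ⟨fun x hx => hpos x (List.mem_cons_of_mem v hx),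
         by rw [List.sum_cons] at hsum; omega⟩
      rw [show (v :: t).length = t.length + 1 from rfl, pvStep_cons m v t ht]
      cases hstep : pvStep (m - v) t.length t with
      | some t' =>
        obtain ⟨hv', hlen', htail⟩ := (ih (m - v) ht hvalt).2 t' hstep
        constructor
        · intro hnone
          simp at hnone
        · intro s' hs'
          have hseq : v :: t' = s' := Option.some.inj hs'
          subst hseq
          refine ⟨⟨?_, ?_⟩, by simp [hlen'], ?_⟩
          · intro x hx
            rcases List.mem_cons.mp hx with h | h
            · omega
            · exact hv'.1 x h
          · rw [List.sum_cons]
            have := hv'.2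
            omega
          · simp only [pvTail]
            rw [htail, hlen']
            simp
      | none =>
        have htail1 := (ih (m - v) ht hvalt).1 hstep
        by_cases hm : m ≤ v + 1 + t.length
        · constructor
          · intro _
            show pvTail m (v :: t) = [v :: t]
            simp only [pvTail]
            rw [htail1, pvRows_nil m t.length (v + 1) (by omega)]
            simp
          · intro s' hs'
            rw [if_pos hm] at hs'
            simp at hs'
        · constructor
          · intro hnone
            rw [if_neg hm] at hnone
            simp at hnone
          · intro s' hs'
            rw [if_neg hm] at hs'
            have hseq : (v + 1) :: List.replicate t.length 1 = s' := Option.some.inj hs'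
            subst hseq
            have hrep : (List.replicate t.length (1 : Int)).sum = (t.length : Int) := by simp
            refine ⟨⟨?_, ?_⟩, by simp, ?_⟩
            · intro x hx
              rcases List.mem_cons.mp hx with h | h
              · omega
              · rw [List.eq_of_mem_replicate h]
            · rw [List.sum_cons, hrep]; omega
            · simp only [pvTail, List.length_replicate]
              rw [htail1, pvOnes_tail t.length (m - (v + 1)) (by omega)]
              rw [pvRows_cons m t.length (v + 1) (by omega)]
              simp

theorem pvRun (f : Nat) : ∀ (m : Int) (s : List Int), s ≠ [] → pvValid m s →
    s :: pvLoop m s.length f s = (pvTail m s).take (f + 1) := by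
  induction f with
  | zero =>
    intro m s hne hval
    show [s] = (pvTail m s).take 1
    cases hstep : pvStep m s.length s with
    | some s' =>
      rw [((pvSucc s m hne hval).2 s' hstep).2.2]
      rfl
    | none =>
      rw [(pvSucc s m hne hval).1 hstep]
      rfl
  | succ f ih =>
    intro m s hne hval
    rw [pvLoop]
    cases hstep : pvStep m s.length s with
    | some s' =>
      obtain ⟨hval', hlen', htail⟩ := (pvSucc s m hne hval).2 s' hstep
      have hne' : s' ≠ [] := by
        intro h
        rw [h] at hlen'
        exact hne (List.eq_nil_of_length_eq_zero hlen'.symm)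
      have := ih m s' hne' hval'
      rw [hlen'] at this
      rw [htail]
      show s :: s' :: pvLoop m s.length f s' = (s :: pvTail m s').take (f + 1 + 1)
      rw [List.take_succ_cons, ← this]
    | none =>
      rw [(pvSucc s m hne hval).1 hstep]
      rfl

theorem pvComps_len (k : Nat) : ∀ (b : Int), (pvComps k b).length ≤ (b.toNat + 1) ^ k := by
  induction k with
  | zero => intro b; simp [pvComps]
  | succ k ih =>
    intro b
    simp only [pvComps]
    rw [List.length_flatMap]
    have hb : ∀ x ∈ (PySem.List.pyRange 1 (b - (k + 1) + 2) 1).map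
        (fun v => ((pvComps k (b - v)).map (fun rest => v :: rest)).length),
        x ≤ (b.toNat + 1) ^ k := by
      intro x hx
      simp only [List.mem_map] at hx
      obtain ⟨v, hv, rfl⟩ := hx
      rw [List.length_map]
      refine le_trans (ih (b - v)) (Nat.pow_le_pow_left ?_ k)
      have := (PySem.List.mem_pyRange_one).mp hv
      omega
    refine le_trans (List.sum_le_card_nsmul _ _ hb) ?_
    rw [List.length_map, PySem.List.length_pyRange_one, smul_eq_mul, pow_succ]
    have : (b - ((k : Int) + 1) + 2 - 1).toNat ≤ b.toNat + 1 := by omega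
    calc (b - ((k:Int) + 1) + 2 - 1).toNat * (b.toNat + 1) ^ k
        ≤ (b.toNat + 1) * (b.toNat + 1) ^ k := Nat.mul_le_mul_right _ this
      _ = (b.toNat + 1) ^ k * (b.toNat + 1) := by ring

-- ===== VERDICT (by name: the statement is the Claim_ definition above) =====
theorem offsetsList_spec : Claim_equal_offsetsList := by
  intro mapping _
  unfold Spec_offsetsList offsetsList offsetsList_alt
  apply PySem.List.foldl_congr_mem
  intro acc nl hnl
  have hb := (PySem.List.mem_pyRange_one).mp hnl
  congr 1
  have hones : (1 : Int) :: List.replicate (nl.toNat - 1) 1 = List.replicate nl.toNat (1 : Int) := by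
    conv_rhs => rw [show nl.toNat = (nl.toNat - 1) + 1 by omega]
    rw [List.replicate_succ]
  rw [hones]
  have hval : pvValid (mapping.length : Int) (List.replicate nl.toNat (1 : Int)) := by
    constructor
    · intro x hx
      rw [List.eq_of_mem_replicate hx]
    · rw [show (List.replicate nl.toNat (1 : Int)).sum = (nl.toNat : Int) by simp]
      omega
  have hne : List.replicate nl.toNat (1 : Int) ≠ [] := by
    simp only [ne_eq, List.replicate_eq_nil_iff]
    omega
  have hrun := pvRun ((mapping.length + 1) ^ (nl.toNat + 1)) (mapping.length : Int)
    (List.replicate nl.toNat 1) hne hval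
  rw [List.length_replicate] at hrun
  rw [hrun, pvOnes_tail nl.toNat (mapping.length : Int) (by omega)]
  apply List.take_of_length_le
  refine le_trans (le_trans (pvComps_len nl.toNat ((mapping.length : Int) - 1)) ?_) (Nat.le_succ _)
  calc (((mapping.length : Int) - 1).toNat + 1) ^ nl.toNat
      ≤ (mapping.length + 1) ^ nl.toNat := Nat.pow_le_pow_left (by omega) _
    _ ≤ (mapping.length + 1) ^ (nl.toNat + 1) := Nat.pow_le_pow_right (by omega) (by omega)
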